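-- pv_equiv track=rewrite | github.com/HyQD/grid-methods | grid_methods/spherical_coordinates/angular_matrix_elements.py | setup_lm_index_mapping_lm_mrestricted
-- ===== SOURCE A (Python) =====
-- def setup_lm_index_mapping_lm_mrestricted(l_max, m_max):
--     lm_I = []
--     I_lm = dict()
--     I = 0
--     for l in range(l_max + 1):
--         temp_m_max = min(l, m_max)
--         for m in range(-temp_m_max, temp_m_max + 1):
--             I_lm[f"{l}{m}"] = I
--             lm_I.append((l, m))
--             I += 1
--
--     return lm_I, I_lm
-- ===== SOURCE B (Python) =====
-- def setup_lm_index_mapping_lm_mrestricted(l_max, m_max):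
--     # Closed-form index: number of (l', m') pairs preceding block l.
--     def _offset(l):
--         if l <= m_max:
--             return l * l
--         return (m_max + 1) ** 2 + (l - m_max - 1) * (2 * m_max + 1)
--
--     lm_I = [
--         (l, j - min(l, m_max))
--         for l in range(l_max + 1)
--         for j in range(2 * min(l, m_max) + 1)
--     ]
--     I_lm = {f"{l}{m}": _offset(l) + m + min(l, m_max) for (l, m) in lm_I}
--     return lm_I, I_lm
-- ===== Notes on version B (the rewrite author's own statement) =====
-- stated objective: alternative
-- what changed: B replaces A's threaded counter by a closed-form index: each (l,m) gets its dict index offset(l)+m+min(l,m_max), where offset(l) is an arithmetic formula for the number of pairs in all earlier l-blocks, so no running state connects the blocks.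
import Mathlib
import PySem

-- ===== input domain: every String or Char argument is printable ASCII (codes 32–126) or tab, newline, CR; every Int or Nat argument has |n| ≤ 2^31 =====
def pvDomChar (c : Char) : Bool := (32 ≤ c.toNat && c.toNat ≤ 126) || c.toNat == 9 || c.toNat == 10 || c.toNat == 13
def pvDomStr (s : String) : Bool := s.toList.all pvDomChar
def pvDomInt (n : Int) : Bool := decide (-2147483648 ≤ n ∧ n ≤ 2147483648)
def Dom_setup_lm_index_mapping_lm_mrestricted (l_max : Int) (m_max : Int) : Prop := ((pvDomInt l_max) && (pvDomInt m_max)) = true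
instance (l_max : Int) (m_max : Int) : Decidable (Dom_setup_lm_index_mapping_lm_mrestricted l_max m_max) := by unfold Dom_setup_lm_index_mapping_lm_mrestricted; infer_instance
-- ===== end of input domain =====

-- B assigns each (l,m) its dict index by a closed-form formula (pairs in all earlier
-- l-blocks, plus position in its own block) instead of A's counter threaded through
-- the nested loops (objective: alternative, same cost).

-- ===== PORT A =====
def setup_lm_index_mapping_lm_mrestricted (l_max : Int) (m_max : Int) : (List (Int × Int)) × (List (String × Int)) :=
  let st : List (Int × Int) × PySem.Dict String Int × Int :=
    (PySem.List.pyRange 0 (l_max + 1) 1).foldl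
      (fun st l =>
        let temp_m_max := min l m_max
        (PySem.List.pyRange (-temp_m_max) (temp_m_max + 1) 1).foldl
          (fun st m =>
            (st.1 ++ [(l, m)],
             st.2.1.insert (PySem.Int.toStr l ++ PySem.Int.toStr m) st.2.2,
             st.2.2 + 1))
          st)
      ([], PySem.Dict.empty, 0)
  (st.1, st.2.1.items)

-- ===== PORT B =====
-- B helper: closed-form count of (l', m') pairs in all blocks with l' < l (Source B's _offset).
def pvOffset (m_max l : Int) : Int :=
  if l ≤ m_max then l * l else (m_max + 1) ^ 2 + (l - m_max - 1) * (2 * m_max + 1)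

def setup_lm_index_mapping_lm_mrestricted_alt (l_max : Int) (m_max : Int) : (List (Int × Int)) × (List (String × Int)) :=
  let lm_I : List (Int × Int) :=
    (PySem.List.pyRange 0 (l_max + 1) 1).flatMap (fun l =>
      (PySem.List.pyRange 0 (2 * (min l m_max) + 1) 1).map (fun j => (l, j - min l m_max)))
  let I_lm : PySem.Dict String Int :=
    lm_I.foldl
      (fun d p => d.insert (PySem.Int.toStr p.1 ++ PySem.Int.toStr p.2)
        (pvOffset m_max p.1 + p.2 + min p.1 m_max))
      PySem.Dict.empty
  (lm_I, I_lm.items)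

-- ===== PRECONDITION & SPEC =====
def Spec_setup_lm_index_mapping_lm_mrestricted (l_max : Int) (m_max : Int) (out : (List (Int × Int)) × (List (String × Int))) : Prop := out = setup_lm_index_mapping_lm_mrestricted_alt l_max m_max
instance (l_max : Int) (m_max : Int) (out : (List (Int × Int)) × (List (String × Int))) : Decidable (Spec_setup_lm_index_mapping_lm_mrestricted l_max m_max out) := by unfold Spec_setup_lm_index_mapping_lm_mrestricted; infer_instance

-- ===== CLAIM (what is proved, stated in full; the proofs are below) =====
def Claim_equal_setup_lm_index_mapping_lm_mrestricted : Prop := ∀ (l_max : Int) (m_max : Int), Dom_setup_lm_index_mapping_lm_mrestricted l_max m_max → Spec_setup_lm_index_mapping_lm_mrestricted l_max m_max (setup_lm_index_mapping_lm_mrestricted l_max m_max)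

-- ===== LEMMAS AND PROOFS =====

-- A's nested loop, abstracted: one step on state (list built so far, dict, counter).
def pvStep (st : List (Int × Int) × PySem.Dict String Int × Int) (p : Int × Int) :
    List (Int × Int) × PySem.Dict String Int × Int :=
  (st.1 ++ [p], st.2.1.insert (PySem.Int.toStr p.1 ++ PySem.Int.toStr p.2) st.2.2, st.2.2 + 1)

def pvIns (d : PySem.Dict String Int) (q : Int × (Int × Int)) : PySem.Dict String Int :=
  d.insert (PySem.Int.toStr q.2.1 ++ PySem.Int.toStr q.2.2) q.1

-- B's block for a given l, and B's closed-form index and dict step.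
def pvBlock (m_max l : Int) : List (Int × Int) :=
  (PySem.List.pyRange 0 (2 * (min l m_max) + 1) 1).map (fun j => (l, j - min l m_max))

def pvIdx (m_max : Int) (p : Int × Int) : Int := pvOffset m_max p.1 + p.2 + min p.1 m_max

-- fold over a flatMap = nested fold
theorem pv_foldl_flatMap {α β γ : Type} (f : γ → β → γ) (g : α → List β) :
    ∀ (ls : List α) (init : γ),
      (ls.flatMap g).foldl f init = ls.foldl (fun acc x => (g x).foldl f acc) init := by
  intro ls
  induction ls with
  | nil => intro init; rfl
  | cons x xs ih =>
      intro init
      simp [List.flatMap_cons, List.foldl_append, ih]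

-- A's counter-threaded fold equals list append plus enumerate-driven dict fold.
theorem pv_main (L : List (Int × Int)) :
    ∀ (acc : List (Int × Int)) (d : PySem.Dict String Int) (i : Int),
      L.foldl pvStep (acc, d, i) =
        (acc ++ L, (PySem.List.enumerate L i).foldl pvIns d, i + L.length) := by
  induction L with
  | nil => intro acc d i; simp [PySem.List.enumerate_nil]
  | cons p L ih =>
      intro acc d i
      rw [List.foldl_cons, PySem.List.enumerate_cons]
      show L.foldl pvStep (acc ++ [p], d.insert _ i, i + 1) = _
      rw [ih]
      simp [pvIns]
      ring

-- enumerate of a mapped range pairs position k with f k.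
theorem pv_enum_map_range (f : Nat → Int × Int) :
    ∀ (n : Nat) (s : Int),
      PySem.List.enumerate ((List.range n).map f) s
        = (List.range n).map (fun k : Nat => ((s + (k : Int), f k) : Int × (Int × Int))) := by
  intro n
  induction n with
  | zero => intro s; simp [PySem.List.enumerate_nil]
  | succ n ih =>
      intro s
      rw [List.range_succ]
      simp only [List.map_append, List.map_cons, List.map_nil]
      rw [PySem.List.enumerate_append, ih]
      simp [PySem.List.enumerate_cons, PySem.List.enumerate_nil]

-- each block, written over List.range
theorem pv_block_range (m_max l : Int) :
    pvBlock m_max l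
      = (List.range (2 * (min l m_max) + 1).toNat).map (fun k : Nat => ((l, (k : Int) - min l m_max) : Int × Int)) := by
  unfold pvBlock
  rw [PySem.List.pyRange_one, List.map_map]
  simp only [Int.sub_zero]
  apply List.map_congr_left
  intro k hk
  simp

-- block length as an Int, when it is nonempty-sized
theorem pv_block_length (m_max l : Int) (h : 0 ≤ 2 * (min l m_max) + 1) :
    ((pvBlock m_max l).length : Int) = 2 * (min l m_max) + 1 := by
  rw [pv_block_range]
  simp
  omega

-- telescoping: offset of l+1 = offset of l + size of block l (for 0 ≤ l, 0 ≤ m_max)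
theorem pv_offset_step (m_max l : Int) (hm : 0 ≤ m_max) :
    pvOffset m_max (l + 1) = pvOffset m_max l + (2 * (min l m_max) + 1) := by
  unfold pvOffset
  split_ifs with h1 h2 h2
  · have : min l m_max = l := by omega
    rw [this]; ring
  · omega
  · have hlm : l = m_max := by omega
    subst hlm
    have : min l l = l := by omega
    rw [this]; ring
  · have : min l m_max = m_max := by omega
    rw [this]; ring

-- enumerate of one block starting at its offset = closed-form indexing of the block
theorem pv_enum_block (m_max l : Int) :
    PySem.List.enumerate (pvBlock m_max l) (pvOffset m_max l)
      = (pvBlock m_max l).map (fun p => (pvIdx m_max p, p)) := by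
  rw [pv_block_range, pv_enum_map_range, List.map_map]
  apply List.map_congr_left
  intro k hk
  simp [Function.comp, pvIdx]
  have : min ((l, (k : Int) - min l m_max).1) m_max = min l m_max := rfl
  ring

-- the full list for upper bound n, and its enumerate from 0
def pvFlat (m_max : Int) (n : Nat) : List (Int × Int) :=
  (PySem.List.pyRange 0 (n : Int) 1).flatMap (pvBlock m_max)

theorem pv_flat_succ (m_max : Int) (n : Nat) :
    pvFlat m_max (n + 1) = pvFlat m_max n ++ pvBlock m_max n := by
  unfold pvFlat
  rw [show ((n + 1 : Nat) : Int) = (n : Int) + 1 by push_cast; ring,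
      PySem.List.pyRange_one_succ_right (by positivity)]
  simp

theorem pv_flat_length (m_max : Int) (hm : 0 ≤ m_max) :
    ∀ (n : Nat), ((pvFlat m_max n).length : Int) = pvOffset m_max (n : Int) := by
  intro n
  induction n with
  | zero =>
      simp [pvFlat]
      unfold pvOffset
      split_ifs with h
      · ring
      · omega
  | succ n ih =>
      rw [pv_flat_succ]
      rw [show ((n + 1 : Nat) : Int) = (n : Int) + 1 by push_cast; ring,
          pv_offset_step m_max n hm]
      rw [List.length_append]
      push_cast
      rw [ih, pv_block_length m_max n (by omega)]

theorem pv_enum_flat (m_max : Int) (hm : 0 ≤ m_max) :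
    ∀ (n : Nat),
      PySem.List.enumerate (pvFlat m_max n) 0
        = (pvFlat m_max n).map (fun p => (pvIdx m_max p, p)) := by
  intro n
  induction n with
  | zero => simp [pvFlat, PySem.List.enumerate_nil]
  | succ n ih =>
      rw [pv_flat_succ, PySem.List.enumerate_append, ih, List.map_append]
      congr 1
      rw [show (0 + ((pvFlat m_max n).length : Int)) = pvOffset m_max (n : Int) by
            rw [pv_flat_length m_max hm n]; ring]
      exact pv_enum_block m_max n

-- if m_max < 0 every block is empty, hence the whole flat list is empty
theorem pv_flat_neg (m_max : Int) (hm : m_max < 0) (n : Nat) : pvFlat m_max n = [] := by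
  unfold pvFlat
  rw [List.flatMap_eq_nil_iff]
  intro l hl
  have h0 : 0 ≤ l := (PySem.List.mem_pyRange_one.mp hl).1
  unfold pvBlock
  rw [PySem.List.pyRange_one_eq_nil (by omega)]
  rfl

-- enumerate = closed-form pairing, for all m_max
theorem pv_enum_flat_all (m_max : Int) (n : Nat) :
    PySem.List.enumerate (pvFlat m_max n) 0
      = (pvFlat m_max n).map (fun p => (pvIdx m_max p, p)) := by
  by_cases hm : 0 ≤ m_max
  · exact pv_enum_flat m_max hm n
  · rw [pv_flat_neg m_max (by omega) n]
    simp [PySem.List.enumerate_nil]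

-- A's inner iteration list coincides with B's block
theorem pv_inner_eq (m_max l : Int) :
    PySem.List.pyRange (-(min l m_max)) (min l m_max + 1) 1
      = (PySem.List.pyRange 0 (2 * (min l m_max) + 1) 1).map (fun j => j - min l m_max) := by
  rw [PySem.List.pyRange_one, PySem.List.pyRange_one]
  rw [List.map_map]
  have he : (min l m_max + 1 - -(min l m_max)) = (2 * (min l m_max) + 1 - 0) := by ring
  rw [he]
  apply List.map_congr_left
  intro k hk
  simp [Function.comp]
  ring

-- ===== VERDICT (by name: the statement is the Claim_ definition above) =====
theorem setup_lm_index_mapping_lm_mrestricted_spec : Claim_equal_setup_lm_index_mapping_lm_mrestricted := by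
  intro l_max m_max _
  unfold Spec_setup_lm_index_mapping_lm_mrestricted
  unfold setup_lm_index_mapping_lm_mrestricted setup_lm_index_mapping_lm_mrestricted_alt
  by_cases hL : 0 ≤ l_max + 1
  case neg =>
    rw [PySem.List.pyRange_one_eq_nil (by omega)]
    rfl
  obtain ⟨n, hn⟩ : ∃ n : Nat, l_max + 1 = (n : Int) := ⟨(l_max + 1).toNat, by omega⟩
  rw [hn]
  have hA :
      (PySem.List.pyRange 0 (n : Int) 1).foldl
        (fun st l =>
          let temp_m_max := min l m_max
          (PySem.List.pyRange (-temp_m_max) (temp_m_max + 1) 1).foldl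
            (fun st m =>
              (st.1 ++ [(l, m)],
               st.2.1.insert (PySem.Int.toStr l ++ PySem.Int.toStr m) st.2.2,
               st.2.2 + 1))
            st)
        ([], PySem.Dict.empty, 0)
      = (pvFlat m_max n).foldl pvStep ([], PySem.Dict.empty, 0) := by
    unfold pvFlat
    rw [pv_foldl_flatMap]
    apply PySem.List.foldl_congr_mem
    intro st l _
    show _ = (pvBlock m_max l).foldl pvStep st
    unfold pvBlock
    dsimp only
    rw [pv_inner_eq, List.foldl_map, List.foldl_map]
    rfl
  rw [hA, pv_main]
  have hD : (PySem.List.enumerate (pvFlat m_max n) 0).foldl pvIns PySem.Dict.empty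
      = (pvFlat m_max n).foldl
          (fun d p => d.insert (PySem.Int.toStr p.1 ++ PySem.Int.toStr p.2)
            (pvOffset m_max p.1 + p.2 + min p.1 m_max))
          PySem.Dict.empty := by
    rw [pv_enum_flat_all, List.foldl_map]
    rfl
  simp only [hD]
  rfl
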